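-- pv_equiv track=rewrite | github.com/Jason101616/LeetCode_Solution | Backtracking_Depth First Search/490. The Maze.py | nextStepHelper
-- ===== SOURCE A (Python) =====
-- def nextStepHelper(maze, curPoint, visited):
--     res = []
--     row, col = len(maze), len(maze[0])
--     findAns = False
--     for i in range(curPoint[1] + 1, col):
--         if maze[curPoint[0]][i] == 1:
--             findAns = True
--             if not visited[curPoint[0]][i - 1]:
--                 res.append([curPoint[0], i - 1])
--             break
--     if not findAns and not visited[curPoint[0]][col - 1]:
--         res.append([curPoint[0], col - 1])
--
--     findAns = False
--     for i in range(curPoint[1] - 1, -1, -1):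
--         if maze[curPoint[0]][i] == 1:
--             findAns = True
--             if not visited[curPoint[0]][i + 1]:
--                 res.append([curPoint[0], i + 1])
--             break
--     if not findAns and not visited[curPoint[0]][0]:
--         res.append([curPoint[0], 0])
--
--     findAns = False
--     for i in range(curPoint[0] + 1, row):
--         if maze[i][curPoint[1]] == 1:
--             findAns = True
--             if not visited[i - 1][curPoint[1]]:
--                 res.append([i - 1, curPoint[1]])
--             break
--     if not findAns and not visited[row - 1][curPoint[1]]:
--         res.append([row - 1, curPoint[1]])
--
--     findAns = False
--     for i in range(curPoint[0] - 1, -1, -1):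
--         if maze[i][curPoint[1]] == 1:
--             findAns = True
--             if not visited[i + 1][curPoint[1]]:
--                 res.append([i + 1, curPoint[1]])
--             break
--     if not findAns and not visited[0][curPoint[1]]:
--         res.append([0, curPoint[1]])
--
--     return res
-- ===== SOURCE B (Python) =====
-- def nextStepHelper(maze, curPoint, visited):
--     rows, cols = len(maze), len(maze[0])
--     r, c = curPoint[0], curPoint[1]
--     rowWalls = [j for j in range(cols) if maze[r][j] == 1]
--     colWalls = [i for i in range(rows) if maze[i][c] == 1]
--     right = min([j for j in rowWalls if j > c], default=cols) - 1
--     left = max([j for j in rowWalls if j < c], default=-1) + 1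
--     down = min([i for i in colWalls if i > r], default=rows) - 1
--     up = max([i for i in colWalls if i < r], default=-1) + 1
--     res = []
--     for rr, cc in ((r, right), (r, left), (down, c), (up, c)):
--         if not visited[rr][cc]:
--             res.append([rr, cc])
--     return res
-- ===== Notes on version B (the rewrite author's own statement) =====
-- stated objective: alternative
-- what changed: A performs four early-exit directional scans (findAns flag, break) stopping at the first wall; B instead collects the wall indices of the ball's row and column in two comprehension passes and computes each stop cell arithmetically as min(walls > pos)-1 / max(walls < pos)+1 with edge defaults, then does the four visited-checked appends in one small loop.
import Mathlib
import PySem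

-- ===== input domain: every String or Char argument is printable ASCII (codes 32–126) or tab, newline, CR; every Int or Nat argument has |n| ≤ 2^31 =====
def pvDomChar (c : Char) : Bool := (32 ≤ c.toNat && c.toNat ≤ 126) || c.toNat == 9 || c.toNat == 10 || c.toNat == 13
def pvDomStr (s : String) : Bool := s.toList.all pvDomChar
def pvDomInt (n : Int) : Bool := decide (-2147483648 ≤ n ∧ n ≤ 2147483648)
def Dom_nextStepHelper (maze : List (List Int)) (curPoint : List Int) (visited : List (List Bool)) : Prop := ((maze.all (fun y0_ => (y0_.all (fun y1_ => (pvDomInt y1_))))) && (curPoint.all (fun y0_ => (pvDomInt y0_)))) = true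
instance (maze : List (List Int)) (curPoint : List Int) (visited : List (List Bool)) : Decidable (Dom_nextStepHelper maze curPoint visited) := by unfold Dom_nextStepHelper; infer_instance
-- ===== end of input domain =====

-- B replaces A's four early-exit scan-for-first-wall paragraphs by two comprehension passes that
-- collect the wall indices of the ball's row and column, computing each stop arithmetically as
-- min(walls > pos)-1 / max(walls < pos)+1 with edge defaults (objective: alternative).

-- ===== PORT A =====
-- maze[r][i] (Python wraparound; default only reachable outside Pre_)
def pvGetM (maze : List (List Int)) (r i : Int) : Int :=
  PySem.List.pyGetD (PySem.List.pyGetD maze r []) i 0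

-- visited[r][i] (Python wraparound; default only reachable outside Pre_)
def pvGetV (visited : List (List Bool)) (r i : Int) : Bool :=
  PySem.List.pyGetD (PySem.List.pyGetD visited r []) i true

-- one of A's four 'for i in range(…): if wall: findAns = True; maybe append; break' loops:
-- returns the updated res and the findAns flag
def scanA (wall : Int → Bool) (vis : Int → Bool) (mk : Int → List Int) :
    List Int → List (List Int) → List (List Int) × Bool
  | [], res => (res, false)
  | i :: rest, res =>
    if wall i then (if vis i then res else res ++ [mk i], true)
    else scanA wall vis mk rest res

-- one of A's four direction paragraphs: the scan loop plus the '!findAns' edge fallback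
def dirA (wall vis : Int → Bool) (mk : Int → List Int) (idxs : List Int)
    (visE : Bool) (mkE : List Int) (res : List (List Int)) : List (List Int) :=
  let s := scanA wall vis mk idxs res
  if !s.2 && !visE then s.1 ++ [mkE] else s.1

def nextStepHelper (maze : List (List Int)) (curPoint : List Int) (visited : List (List Bool)) : List (List Int) :=
  let row : Int := maze.length
  let col : Int := (PySem.List.pyGetD maze 0 []).length
  let r := PySem.List.pyGetD curPoint 0 0
  let c := PySem.List.pyGetD curPoint 1 0
  let res1 := dirA (fun i => pvGetM maze r i == 1) (fun i => pvGetV visited r (i - 1))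
      (fun i => [r, i - 1]) (PySem.List.pyRange (c + 1) col 1)
      (pvGetV visited r (col - 1)) [r, col - 1] []
  let res2 := dirA (fun i => pvGetM maze r i == 1) (fun i => pvGetV visited r (i + 1))
      (fun i => [r, i + 1]) (PySem.List.pyRange (c - 1) (-1) (-1))
      (pvGetV visited r 0) [r, 0] res1
  let res3 := dirA (fun i => pvGetM maze i c == 1) (fun i => pvGetV visited (i - 1) c)
      (fun i => [i - 1, c]) (PySem.List.pyRange (r + 1) row 1)
      (pvGetV visited (row - 1) c) [row - 1, c] res2
  dirA (fun i => pvGetM maze i c == 1) (fun i => pvGetV visited (i + 1) c)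
      (fun i => [i + 1, c]) (PySem.List.pyRange (r - 1) (-1) (-1))
      (pvGetV visited 0 c) [0, c] res3

-- ===== PORT B =====
-- Source B: wall-index lists of the ball's row and column, stop cells by min/max with defaults,
-- then the four visited-checked appends in one loop over the (cell, cell, cell, cell) tuple.
def nextStepHelper_alt (maze : List (List Int)) (curPoint : List Int) (visited : List (List Bool)) : List (List Int) :=
  let rows : Int := maze.length
  let cols : Int := (PySem.List.pyGetD maze 0 []).length
  let r := PySem.List.pyGetD curPoint 0 0
  let c := PySem.List.pyGetD curPoint 1 0
  let rowWalls := (PySem.List.pyRange 0 cols 1).filter (fun j => pvGetM maze r j == 1)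
  let colWalls := (PySem.List.pyRange 0 rows 1).filter (fun i => pvGetM maze i c == 1)
  let right := PySem.List.minD (rowWalls.filter (fun j => c < j)) (fun x => x) cols - 1
  let left  := PySem.List.maxD (rowWalls.filter (fun j => j < c)) (fun x => x) (-1) + 1
  let down  := PySem.List.minD (colWalls.filter (fun i => r < i)) (fun x => x) rows - 1
  let up    := PySem.List.maxD (colWalls.filter (fun i => i < r)) (fun x => x) (-1) + 1
  ([(r, right), (r, left), (down, c), (up, c)] : List (Int × Int)).foldl
    (fun res p => if !pvGetV visited p.1 p.2 then res ++ [[p.1, p.2]] else res) []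

-- ===== PRECONDITION & SPEC =====
-- Pre_ excludes the inputs on which A raises (missing coordinates, a start index outside Python's
-- valid possibly-negative index range, rows/visited not matching the maze's rectangle; the
-- rectangularity is slightly stronger than strictly needed, so a few ragged inputs on which A
-- happens to return after an early wall break are excluded too, and A and B agree there as well);
-- in addition it excludes curPoint with a negative coordinate whose Python-wraparound scan prefix
-- contains a wall: there A stops at a negative index and returns negative coordinate pairs, an
-- artefact of negative indexing (the last two conjuncts; they are vacuous for non-negative curPoint).
def Pre_nextStepHelper (maze : List (List Int)) (curPoint : List Int) (visited : List (List Bool)) : Prop :=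
  2 ≤ curPoint.length ∧
  -(maze.length : Int) ≤ PySem.List.pyGetD curPoint 0 0 ∧
  PySem.List.pyGetD curPoint 0 0 < (maze.length : Int) ∧
  -((PySem.List.pyGetD maze 0 []).length : Int) ≤ PySem.List.pyGetD curPoint 1 0 ∧
  PySem.List.pyGetD curPoint 1 0 < ((PySem.List.pyGetD maze 0 []).length : Int) ∧
  (∀ rw ∈ maze, rw.length = (PySem.List.pyGetD maze 0 []).length) ∧
  visited.length = maze.length ∧
  (∀ vr ∈ visited, vr.length = (PySem.List.pyGetD maze 0 []).length) ∧
  (∀ i ∈ PySem.List.pyRange (PySem.List.pyGetD curPoint 1 0 + 1) 0 1,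
      pvGetM maze (PySem.List.pyGetD curPoint 0 0) i ≠ 1) ∧
  (∀ i ∈ PySem.List.pyRange (PySem.List.pyGetD curPoint 0 0 + 1) 0 1,
      pvGetM maze i (PySem.List.pyGetD curPoint 1 0) ≠ 1)

instance (maze : List (List Int)) (curPoint : List Int) (visited : List (List Bool)) : Decidable (Pre_nextStepHelper maze curPoint visited) := by unfold Pre_nextStepHelper; infer_instance

def pvWitness_nextStepHelper : List (List Int) × List Int × List (List Bool) :=
  ([[0, 1], [0, 0]], [0, 0], [[false, false], [false, false]])

def Spec_nextStepHelper (maze : List (List Int)) (curPoint : List Int) (visited : List (List Bool)) (out : List (List Int)) : Prop := out = nextStepHelper_alt maze curPoint visited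
instance (maze : List (List Int)) (curPoint : List Int) (visited : List (List Bool)) (out : List (List Int)) : Decidable (Spec_nextStepHelper maze curPoint visited out) := by unfold Spec_nextStepHelper; infer_instance

-- ===== CLAIM (what is proved, stated in full; the proofs are below) =====
def Claim_equal_nextStepHelper : Prop := ∀ (maze : List (List Int)) (curPoint : List Int) (visited : List (List Bool)), Dom_nextStepHelper maze curPoint visited → Pre_nextStepHelper maze curPoint visited → Spec_nextStepHelper maze curPoint visited (nextStepHelper maze curPoint visited)

-- ===== LEMMAS AND PROOFS =====

-- A's loop = conditional single append driven by the first wall index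
lemma scanA_find (wall : Int → Bool) (vis : Int → Bool) (mk : Int → List Int)
    (idxs : List Int) (res : List (List Int)) :
    scanA wall vis mk idxs res =
      (idxs.find? wall).elim (res, false) (fun i => (if vis i then res else res ++ [mk i], true)) := by
  induction idxs with
  | nil => simp [scanA, Option.elim]
  | cons i rest ih =>
    by_cases h : wall i = true
    · simp [scanA, List.find?, h]
    · simp only [Bool.not_eq_true] at h
      simp [scanA, List.find?, h, ih]

-- first match = head of the filtered list
lemma find?_eq_head?_filter (q : Int → Bool) (l : List Int) :
    l.find? q = (l.filter q).head? := by
  induction l with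
  | nil => rfl
  | cons x t ih =>
    by_cases h : q x = true
    · simp [h]
    · rw [List.find?_cons_of_neg (by simp [h]), List.filter_cons_of_neg (by simp [h]), ih]

-- min of an ascending list is its head
lemma min?_eq_head?_of_pairwise (l : List Int) (h : l.Pairwise (· ≤ ·)) :
    PySem.List.min? l (fun x => x) = l.head? := by
  cases l with
  | nil => rfl
  | cons x t =>
    rw [PySem.List.min?_id_cons]
    have hx : ∀ y ∈ t, x ≤ y := (List.pairwise_cons.mp h).1
    have h1 := (PySem.List.foldl_min_le t x).1
    have h2 := PySem.List.foldl_min_mem t x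
    have : t.foldl min x = x := by
      rcases h2 with h2 | h2
      · exact h2
      · exact le_antisymm h1 (hx _ h2)
    rw [this]; rfl

-- running max over an ascending list starting below it reaches the last element
lemma foldl_max_pairwise (l : List Int) : ∀ x, l.Pairwise (· ≤ ·) → (∀ y ∈ l, x ≤ y) →
    l.foldl max x = l.getLastD x := by
  induction l with
  | nil => intro x _ _; rfl
  | cons y t ih =>
    intro x h hx
    have hy : x ≤ y := hx y (by simp)
    have h' := List.pairwise_cons.mp h
    simp only [List.foldl, List.getLastD_cons]
    rw [max_eq_right hy]
    exact ih y h'.2 h'.1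

-- max of an ascending list is its last element
lemma max?_eq_getLast?_of_pairwise (l : List Int) (h : l.Pairwise (· ≤ ·)) :
    PySem.List.max? l (fun x => x) = l.getLast? := by
  cases l with
  | nil => rfl
  | cons x t =>
    rw [PySem.List.max?_id_cons]
    have h' := List.pairwise_cons.mp h
    rw [foldl_max_pairwise t x h'.2 h'.1, List.getLast?_cons, List.getLastD_eq_getLast?]

-- filtered ascending range keeps ascending
lemma pairwise_filter_range (q : Int → Bool) (a b : Int) :
    ((PySem.List.pyRange a b 1).filter q).Pairwise (· ≤ ·) := by
  have := PySem.List.pairwise_lt_pyRange_one a b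
  exact ((this.filter q).imp (fun h => le_of_lt h))

-- the strictly-greater filter of [0, n) is the subrange starting at c+1 (c ≥ 0 side)
lemma filter_gt_range (c n : Int) (h0 : 0 ≤ c) (hn : c < n) :
    (PySem.List.pyRange 0 n 1).filter (fun j => decide (c < j)) = PySem.List.pyRange (c + 1) n 1 := by
  rw [PySem.List.pyRange_one_append 0 (c + 1) n (by omega) (by omega), List.filter_append]
  have e1 : (PySem.List.pyRange 0 (c + 1) 1).filter (fun j => decide (c < j)) = [] := by
    rw [List.filter_eq_nil_iff]
    intro x hx
    have := (PySem.List.mem_pyRange_one).mp hx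
    simp; omega
  have e2 : (PySem.List.pyRange (c + 1) n 1).filter (fun j => decide (c < j)) = PySem.List.pyRange (c + 1) n 1 := by
    rw [List.filter_eq_self]
    intro x hx
    have := (PySem.List.mem_pyRange_one).mp hx
    simp; omega
  rw [e1, e2]; rfl

-- the strictly-greater filter keeps everything for negative c
lemma filter_gt_range_neg (c n : Int) (h0 : c < 0) :
    (PySem.List.pyRange 0 n 1).filter (fun j => decide (c < j)) = PySem.List.pyRange 0 n 1 := by
  rw [List.filter_eq_self]
  intro x hx
  have := (PySem.List.mem_pyRange_one).mp hx
  simp; omega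

-- the strictly-less filter of [0, n) is [0, c) (c ≥ 0, c ≤ n)
lemma filter_lt_range (c n : Int) (h0 : 0 ≤ c) (hn : c ≤ n) :
    (PySem.List.pyRange 0 n 1).filter (fun j => decide (j < c)) = PySem.List.pyRange 0 c 1 := by
  rw [PySem.List.pyRange_one_append 0 c n h0 hn, List.filter_append]
  have e1 : (PySem.List.pyRange 0 c 1).filter (fun j => decide (j < c)) = PySem.List.pyRange 0 c 1 := by
    rw [List.filter_eq_self]
    intro x hx
    have := (PySem.List.mem_pyRange_one).mp hx
    simp; omega
  have e2 : (PySem.List.pyRange c n 1).filter (fun j => decide (j < c)) = [] := by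
    rw [List.filter_eq_nil_iff]
    intro x hx
    have := (PySem.List.mem_pyRange_one).mp hx
    simp; omega
  rw [e1, e2]; simp

-- the strictly-less filter is empty for c ≤ 0
lemma filter_lt_range_neg (c n : Int) (h0 : c ≤ 0) :
    (PySem.List.pyRange 0 n 1).filter (fun j => decide (j < c)) = [] := by
  rw [List.filter_eq_nil_iff]
  intro x hx
  have := (PySem.List.mem_pyRange_one).mp hx
  simp; omega

-- CORE, increasing direction: A's first-wall search over range(c+1, n) equals B's
-- min over the walls of [0, n) that lie beyond c, given the wall-free wrapped prefix.
lemma dirPos (q : Int → Bool) (c n : Int) (hnn : 0 ≤ n) (hn : c < n)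
    (hwrap : ∀ i ∈ PySem.List.pyRange (c + 1) 0 1, ¬ q i = true) :
    (PySem.List.pyRange (c + 1) n 1).find? q =
      PySem.List.min? (((PySem.List.pyRange 0 n 1).filter q).filter (fun j => decide (c < j))) (fun x => x) := by
  rw [List.filter_comm]
  by_cases hc : 0 ≤ c
  · rw [filter_gt_range c n hc hn,
      min?_eq_head?_of_pairwise _ (pairwise_filter_range q (c + 1) n),
      ← find?_eq_head?_filter]
  · push Not at hc
    rw [filter_gt_range_neg c n hc,
      min?_eq_head?_of_pairwise _ (pairwise_filter_range q 0 n),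
      ← find?_eq_head?_filter,
      PySem.List.pyRange_one_append (c + 1) 0 n (by omega) hnn,
      List.find?_append]
    have : (PySem.List.pyRange (c + 1) 0 1).find? q = none := by
      rw [List.find?_eq_none]
      intro x hx
      exact hwrap x hx
    rw [this]; rfl

-- CORE, decreasing direction: A's first-wall search over range(c-1, -1, -1) equals B's
-- max over the walls of [0, n) that lie before c.
lemma dirNeg (q : Int → Bool) (c n : Int) (hn : c ≤ n) :
    (PySem.List.pyRange (c - 1) (-1) (-1)).find? q =
      PySem.List.max? (((PySem.List.pyRange 0 n 1).filter q).filter (fun j => decide (j < c))) (fun x => x) := by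
  rw [List.filter_comm]
  by_cases hc : 0 ≤ c
  · rw [filter_lt_range c n hc hn,
      max?_eq_getLast?_of_pairwise _ (pairwise_filter_range q 0 c),
      PySem.List.pyRange_neg_one_eq_reverse]
    have e : c - 1 + 1 = c := by omega
    rw [show (-1 : Int) + 1 = 0 from rfl, e, find?_eq_head?_filter, List.filter_reverse,
      List.head?_reverse]
  · push Not at hc
    rw [filter_lt_range_neg c n (by omega),
      PySem.List.pyRange_neg_one_eq_reverse]
    have : PySem.List.pyRange ((-1) + 1) (c - 1 + 1) 1 = [] :=
      PySem.List.pyRange_one_eq_nil (by omega)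
    rw [this]; rfl

-- Option massage: the found/not-found case split equals default-then-adjust
lemma elim_getD_sub (o : Option Int) (n : Int) :
    o.getD n - 1 = o.elim (n - 1) (fun i => i - 1) := by cases o <;> rfl

lemma elim_getD_add (o : Option Int) :
    o.getD (-1) + 1 = o.elim 0 (fun i => i - -1) := by
  cases o with
  | none => rfl
  | some i => simp [Option.getD, Option.elim]

-- ===== VERDICT (by name: the statement is the Claim_ definition above) =====
theorem nextStepHelper_spec : Claim_equal_nextStepHelper := by
  intro maze curPoint visited _ hpre
  obtain ⟨-, hr1, hr2, hc1, hc2, -, -, -, hwc, hwr⟩ := hpre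
  unfold Spec_nextStepHelper nextStepHelper nextStepHelper_alt
  have e1 : ∀ res, dirA (fun i => pvGetM maze (PySem.List.pyGetD curPoint 0 0) i == 1)
      (fun i => pvGetV visited (PySem.List.pyGetD curPoint 0 0) (i - 1))
      (fun i => [PySem.List.pyGetD curPoint 0 0, i - 1])
      (PySem.List.pyRange (PySem.List.pyGetD curPoint 1 0 + 1) ((PySem.List.pyGetD maze 0 []).length : Int) 1)
      (pvGetV visited (PySem.List.pyGetD curPoint 0 0) (((PySem.List.pyGetD maze 0 []).length : Int) - 1))
      [PySem.List.pyGetD curPoint 0 0, ((PySem.List.pyGetD maze 0 []).length : Int) - 1] res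
    = (if !pvGetV visited (PySem.List.pyGetD curPoint 0 0)
          (((PySem.List.pyRange (PySem.List.pyGetD curPoint 1 0 + 1) ((PySem.List.pyGetD maze 0 []).length : Int) 1).find?
              (fun j => pvGetM maze (PySem.List.pyGetD curPoint 0 0) j == 1)).elim
            (((PySem.List.pyGetD maze 0 []).length : Int) - 1) (fun i => i - 1)) then
        res ++ [[PySem.List.pyGetD curPoint 0 0,
          (((PySem.List.pyRange (PySem.List.pyGetD curPoint 1 0 + 1) ((PySem.List.pyGetD maze 0 []).length : Int) 1).find?
              (fun j => pvGetM maze (PySem.List.pyGetD curPoint 0 0) j == 1)).elim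
            (((PySem.List.pyGetD maze 0 []).length : Int) - 1) (fun i => i - 1))]]
      else res) := by
    intro res
    unfold dirA
    rw [scanA_find]
    cases (PySem.List.pyRange (PySem.List.pyGetD curPoint 1 0 + 1) ((PySem.List.pyGetD maze 0 []).length : Int) 1).find?
        (fun j => pvGetM maze (PySem.List.pyGetD curPoint 0 0) j == 1) <;>
      simp [Option.elim] <;> split_ifs <;> simp_all
  have e2 : ∀ res, dirA (fun i => pvGetM maze (PySem.List.pyGetD curPoint 0 0) i == 1)
      (fun i => pvGetV visited (PySem.List.pyGetD curPoint 0 0) (i + 1))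
      (fun i => [PySem.List.pyGetD curPoint 0 0, i + 1])
      (PySem.List.pyRange (PySem.List.pyGetD curPoint 1 0 - 1) (-1) (-1))
      (pvGetV visited (PySem.List.pyGetD curPoint 0 0) 0)
      [PySem.List.pyGetD curPoint 0 0, 0] res
    = (if !pvGetV visited (PySem.List.pyGetD curPoint 0 0)
          (((PySem.List.pyRange (PySem.List.pyGetD curPoint 1 0 - 1) (-1) (-1)).find?
              (fun j => pvGetM maze (PySem.List.pyGetD curPoint 0 0) j == 1)).elim 0 (fun i => i - -1)) then
        res ++ [[PySem.List.pyGetD curPoint 0 0,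
          (((PySem.List.pyRange (PySem.List.pyGetD curPoint 1 0 - 1) (-1) (-1)).find?
              (fun j => pvGetM maze (PySem.List.pyGetD curPoint 0 0) j == 1)).elim 0 (fun i => i - -1))]]
      else res) := by
    intro res
    unfold dirA
    rw [scanA_find]
    cases (PySem.List.pyRange (PySem.List.pyGetD curPoint 1 0 - 1) (-1) (-1)).find?
        (fun j => pvGetM maze (PySem.List.pyGetD curPoint 0 0) j == 1) <;>
      simp [Option.elim, sub_neg_eq_add] <;> split_ifs <;> simp_all
  have e3 : ∀ res, dirA (fun i => pvGetM maze i (PySem.List.pyGetD curPoint 1 0) == 1)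
      (fun i => pvGetV visited (i - 1) (PySem.List.pyGetD curPoint 1 0))
      (fun i => [i - 1, PySem.List.pyGetD curPoint 1 0])
      (PySem.List.pyRange (PySem.List.pyGetD curPoint 0 0 + 1) ((maze.length : Int)) 1)
      (pvGetV visited ((maze.length : Int) - 1) (PySem.List.pyGetD curPoint 1 0))
      [(maze.length : Int) - 1, PySem.List.pyGetD curPoint 1 0] res
    = (if !pvGetV visited
          (((PySem.List.pyRange (PySem.List.pyGetD curPoint 0 0 + 1) ((maze.length : Int)) 1).find?
              (fun j => pvGetM maze j (PySem.List.pyGetD curPoint 1 0) == 1)).elim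
            ((maze.length : Int) - 1) (fun i => i - 1)) (PySem.List.pyGetD curPoint 1 0) then
        res ++ [[(((PySem.List.pyRange (PySem.List.pyGetD curPoint 0 0 + 1) ((maze.length : Int)) 1).find?
              (fun j => pvGetM maze j (PySem.List.pyGetD curPoint 1 0) == 1)).elim
            ((maze.length : Int) - 1) (fun i => i - 1)), PySem.List.pyGetD curPoint 1 0]]
      else res) := by
    intro res
    unfold dirA
    rw [scanA_find]
    cases (PySem.List.pyRange (PySem.List.pyGetD curPoint 0 0 + 1) ((maze.length : Int)) 1).find?
        (fun j => pvGetM maze j (PySem.List.pyGetD curPoint 1 0) == 1) <;>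
      simp [Option.elim] <;> split_ifs <;> simp_all
  have e4 : ∀ res, dirA (fun i => pvGetM maze i (PySem.List.pyGetD curPoint 1 0) == 1)
      (fun i => pvGetV visited (i + 1) (PySem.List.pyGetD curPoint 1 0))
      (fun i => [i + 1, PySem.List.pyGetD curPoint 1 0])
      (PySem.List.pyRange (PySem.List.pyGetD curPoint 0 0 - 1) (-1) (-1))
      (pvGetV visited 0 (PySem.List.pyGetD curPoint 1 0))
      [0, PySem.List.pyGetD curPoint 1 0] res
    = (if !pvGetV visited
          (((PySem.List.pyRange (PySem.List.pyGetD curPoint 0 0 - 1) (-1) (-1)).find?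
              (fun j => pvGetM maze j (PySem.List.pyGetD curPoint 1 0) == 1)).elim 0 (fun i => i - -1))
          (PySem.List.pyGetD curPoint 1 0) then
        res ++ [[(((PySem.List.pyRange (PySem.List.pyGetD curPoint 0 0 - 1) (-1) (-1)).find?
              (fun j => pvGetM maze j (PySem.List.pyGetD curPoint 1 0) == 1)).elim 0 (fun i => i - -1)),
          PySem.List.pyGetD curPoint 1 0]]
      else res) := by
    intro res
    unfold dirA
    rw [scanA_find]
    cases (PySem.List.pyRange (PySem.List.pyGetD curPoint 0 0 - 1) (-1) (-1)).find?
        (fun j => pvGetM maze j (PySem.List.pyGetD curPoint 1 0) == 1) <;>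
      simp [Option.elim, sub_neg_eq_add] <;> split_ifs <;> simp_all
  have fr := dirPos (fun j => pvGetM maze (PySem.List.pyGetD curPoint 0 0) j == 1)
      (PySem.List.pyGetD curPoint 1 0) ((PySem.List.pyGetD maze 0 []).length : Int)
      (by positivity) hc2 (fun i hi => by simpa using hwc i hi)
  have fl := dirNeg (fun j => pvGetM maze (PySem.List.pyGetD curPoint 0 0) j == 1)
      (PySem.List.pyGetD curPoint 1 0) ((PySem.List.pyGetD maze 0 []).length : Int) (le_of_lt hc2)
  have fd := dirPos (fun j => pvGetM maze j (PySem.List.pyGetD curPoint 1 0) == 1)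
      (PySem.List.pyGetD curPoint 0 0) ((maze.length : Int))
      (by positivity) hr2 (fun i hi => by simpa using hwr i hi)
  have fu := dirNeg (fun j => pvGetM maze j (PySem.List.pyGetD curPoint 1 0) == 1)
      (PySem.List.pyGetD curPoint 0 0) ((maze.length : Int)) (le_of_lt hr2)
  simp only [List.foldl]
  rw [e1, e2, e3, e4]
  simp only [PySem.List.minD, PySem.List.maxD]
  rw [← fr, ← fl, ← fd, ← fu, elim_getD_sub, elim_getD_sub, elim_getD_add, elim_getD_add]
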